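-- pv_equiv track=rewrite | github.com/nour2003-coder/cv_analyzer_interview | chatbot/nodes/initialization.py | split_requirement_terms
-- ===== SOURCE A (Python) =====
-- import unicodedata
-- from typing import Dict, Any, List
--
-- def normalize_text(value: str) -> str:
--     """Normalise un texte pour les comparaisons simples."""
--     ascii_text = unicodedata.normalize("NFKD", value).encode("ascii", "ignore").decode("ascii")
--     cleaned = []
--     for char in ascii_text.lower():
--         cleaned.append(char if char.isalnum() or char.isspace() else " ")
--     return " ".join("".join(cleaned).split())
--
-- def split_requirement_terms(requirement: str) -> List[str]:
--     """Decoupe une exigence en sous-termes simples."""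
--     normalized = normalize_text(requirement)
--     separators = ["(", ")", ",", "/", " et "]
--     terms = [normalized]
--     for sep in separators:
--         expanded = []
--         for term in terms:
--             expanded.extend([part.strip() for part in term.split(sep) if part.strip()])
--         terms = expanded
--     return [term for term in terms if len(term) >= 3]
-- ===== SOURCE B (Python) =====
-- import unicodedata
-- from typing import List
--
-- def normalize_text(value: str) -> str:
--     """Normalise un texte pour les comparaisons simples."""
--     ascii_text = unicodedata.normalize("NFKD", value).encode("ascii", "ignore").decode("ascii")
--     cleaned = []
--     for char in ascii_text.lower():
--         cleaned.append(char if char.isalnum() or char.isspace() else " ")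
--     return " ".join("".join(cleaned).split())
--
-- def split_requirement_terms(requirement: str) -> List[str]:
--     """Decoupe une exigence en sous-termes simples (single left-to-right scan)."""
--     normalized = normalize_text(requirement)
--     parts = []
--     buf = []
--     i = 0
--     n = len(normalized)
--     while i < n:
--         c = normalized[i]
--         if c in "(),/":
--             parts.append("".join(buf))
--             buf = []
--             i += 1
--         elif normalized.startswith(" et ", i):
--             parts.append("".join(buf))
--             buf = []
--             i += 4
--         else:
--             buf.append(c)
--             i += 1
--     parts.append("".join(buf))
--     return [p.strip() for p in parts if len(p.strip()) >= 3]
-- ===== Notes on version B (the rewrite author's own statement) =====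
-- stated objective: simpler
-- what changed: A repeatedly re-splits a growing list of terms once per separator (five successive split/strip/filter passes over intermediate lists); B scans the normalized string once left to right, cutting at every separator during a single pass, then strips and length-filters the fragments once.
import Mathlib
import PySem

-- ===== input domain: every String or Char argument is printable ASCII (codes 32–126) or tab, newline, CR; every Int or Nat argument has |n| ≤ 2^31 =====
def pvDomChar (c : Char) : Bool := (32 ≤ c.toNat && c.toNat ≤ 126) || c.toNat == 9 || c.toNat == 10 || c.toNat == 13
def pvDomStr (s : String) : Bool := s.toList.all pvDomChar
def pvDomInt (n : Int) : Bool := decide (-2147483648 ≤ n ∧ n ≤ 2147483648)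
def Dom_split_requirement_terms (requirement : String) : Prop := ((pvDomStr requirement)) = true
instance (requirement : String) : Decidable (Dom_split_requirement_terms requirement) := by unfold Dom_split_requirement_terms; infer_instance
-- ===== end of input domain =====

-- B replaces A's five successive re-splitting passes by one left-to-right scan that cuts at every separator; objective: simpler (one pass).

-- ===== PORT A =====
-- shared module helper (used verbatim by both the original and B)
def normalize_text (value : String) : String :=
  -- unicodedata.normalize("NFKD", ·) + .encode("ascii","ignore").decode("ascii") is the identity
  -- on the ASCII domain Dom_ (exact there); the rest is ported step for step
  let asciiText := value
  let cleaned := (PySem.Str.lower asciiText).toList.foldl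
      (fun acc c => acc ++ [if PySem.Chars.isalnum c || PySem.Chars.isspace c then c else ' ']) []
  PySem.Str.join " " (PySem.Str.split₀ (String.ofList cleaned))

def split_requirement_terms (requirement : String) : List String :=
  let normalized := normalize_text requirement
  let separators : List String := ["(", ")", ",", "/", " et "]
  let terms := separators.foldl
      (fun terms sep =>
        terms.foldl
          (fun expanded term =>
            expanded ++ (((PySem.Str.split? term sep).getD []).filter
                (fun part => PySem.Str.strip part != "")).map PySem.Str.strip)
          [])
      [normalized]
  terms.filter (fun term => decide (3 ≤ PySem.Str.len term))

-- ===== PORT B =====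
-- the while-loop of Source B: one scan over the characters, cutting at "(", ")", ",", "/" and " et "
def pvScanGo (s : List Char) (buf : List Char) (parts : List (List Char)) : List (List Char) :=
  match s with
  | [] => parts ++ [buf]
  | c :: rest =>
    if ("(),/".toList).contains c then
      pvScanGo rest [] (parts ++ [buf])
    else if PySem.Chars.startswith (c :: rest) (" et ".toList) then
      pvScanGo ((c :: rest).drop 4) [] (parts ++ [buf])
    else
      pvScanGo rest (buf ++ [c]) parts
termination_by s.length
decreasing_by all_goals (simp [List.length_drop]; try omega)

def split_requirement_terms_alt (requirement : String) : List String :=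
  let normalized := normalize_text requirement
  let parts := pvScanGo normalized.toList [] []
  (parts.filter (fun p => decide (3 ≤ (PySem.Chars.strip p).length))).map
    (fun p => String.ofList (PySem.Chars.strip p))

-- ===== PRECONDITION & SPEC =====
def Spec_split_requirement_terms (requirement : String) (out : List String) : Prop := out = split_requirement_terms_alt requirement
instance (requirement : String) (out : List String) : Decidable (Spec_split_requirement_terms requirement out) := by unfold Spec_split_requirement_terms; infer_instance

-- ===== CLAIM (what is proved, stated in full; the proofs are below) =====
def Claim_equal_split_requirement_terms : Prop := ∀ (requirement : String), Dom_split_requirement_terms requirement → Spec_split_requirement_terms requirement (split_requirement_terms requirement)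

-- ===== LEMMAS AND PROOFS =====

-- every piece produced by split₀ is nonempty and consists of non-space characters satisfying Q
theorem pv_split0_go_pieces (Q : Char → Prop) :
    ∀ (s cur acc : _),
      (∀ c ∈ s, PySem.Chars.isspace c = true ∨ Q c) →
      (∀ p ∈ acc, p ≠ [] ∧ ∀ c ∈ p, Q c ∧ PySem.Chars.isspace c = false) →
      (∀ c ∈ cur, Q c ∧ PySem.Chars.isspace c = false) →
      ∀ p ∈ PySem.Chars.split₀.go s cur acc, p ≠ [] ∧ ∀ c ∈ p, Q c ∧ PySem.Chars.isspace c = false := by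
  intro s
  induction s with
  | nil =>
    intro cur acc _ hacc hcur
    rw [PySem.Chars.split₀.go]
    cases hc : cur.isEmpty with
    | true =>
      simp only [if_pos]
      intro p hp
      exact hacc p (by simpa using hp)
    | false =>
      simp only [Bool.false_eq_true, if_false]
      intro p hp
      simp only [List.mem_reverse, List.mem_cons] at hp
      rcases hp with h | h
      · subst h
        refine ⟨by simpa [List.isEmpty_iff] using hc, ?_⟩
        intro c hcmem
        exact hcur c (by simpa using hcmem)
      · exact hacc p h
  | cons c rest ih =>
    intro cur acc hs hacc hcur
    rw [PySem.Chars.split₀.go]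
    have hsc := hs c (by simp)
    cases hsp : PySem.Chars.isspace c with
    | true =>
      simp only [if_pos]
      cases hc : cur.isEmpty with
      | true =>
        simp only [if_pos]
        exact ih [] acc (fun x hx => hs x (by simp [hx])) hacc (by simp)
      | false =>
        simp only [Bool.false_eq_true, if_false]
        refine ih [] (cur.reverse :: acc) (fun x hx => hs x (by simp [hx])) ?_ (by simp)
        intro p hp
        rcases List.mem_cons.mp hp with h | h
        · subst h
          refine ⟨by simpa [List.isEmpty_iff] using hc, ?_⟩
          intro x hx
          exact hcur x (by simpa using hx)
        · exact hacc p h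
    | false =>
      simp only [Bool.false_eq_true, if_false]
      refine ih (c :: cur) acc (fun x hx => hs x (by simp [hx])) hacc ?_
      intro x hx
      rcases List.mem_cons.mp hx with h | h
      · subst h
        rcases hsc with h' | h'
        · rw [hsp] at h'; exact absurd h' (by simp)
        · exact ⟨h', hsp⟩
      · exact hcur x h

-- the two-piece unfolding of intercalate
theorem pv_join_two (sep x y : List Char) (zs : List (List Char)) :
    List.intercalate sep (x :: y :: zs) = x ++ sep ++ List.intercalate sep (y :: zs) := by
  simp [List.intercalate, List.intersperse]

theorem pv_mem_join (Q : Char → Prop) :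
    ∀ (ps : List (List Char)), (∀ p ∈ ps, ∀ c ∈ p, Q c) →
      ∀ c ∈ List.intercalate [' '] ps, Q c ∨ c = ' ' := by
  intro ps
  induction ps with
  | nil => simp [List.intercalate]
  | cons p ps ih =>
    intro h c hc
    cases ps with
    | nil =>
      simp [List.intercalate] at hc
      exact Or.inl (h p (by simp) c hc)
    | cons q qs =>
      rw [pv_join_two] at hc
      simp only [List.mem_append] at hc
      rcases hc with (hc | hc) | hc
      · exact Or.inl (h p (by simp) c hc)
      · simp at hc; exact Or.inr hc
      · exact ih (fun r hr => h r (by simp [hr])) c hc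

theorem pv_head_join :
    ∀ (ps : List (List Char)), (∀ p ∈ ps, p ≠ [] ∧ ∀ c ∈ p, PySem.Chars.isspace c = false) →
      ps ≠ [] → ∃ c t, List.intercalate [' '] ps = c :: t ∧ PySem.Chars.isspace c = false := by
  intro ps h hne
  cases ps with
  | nil => exact absurd rfl hne
  | cons p ps =>
    obtain ⟨hpne, hpc⟩ := h p (by simp)
    cases hp : p with
    | nil => exact absurd hp hpne
    | cons c t =>
      have hc : PySem.Chars.isspace c = false := hpc c (by simp [hp])
      cases ps with
      | nil => exact ⟨c, t, by simp [List.intercalate], hc⟩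
      | cons q qs => exact ⟨c, t ++ [' '] ++ List.intercalate [' '] (q :: qs), by rw [pv_join_two]; simp, hc⟩

theorem pv_last_join :
    ∀ (ps : List (List Char)), (∀ p ∈ ps, p ≠ [] ∧ ∀ c ∈ p, PySem.Chars.isspace c = false) →
      ps ≠ [] → ∃ c t, (List.intercalate [' '] ps).reverse = c :: t ∧ PySem.Chars.isspace c = false := by
  intro ps
  induction ps with
  | nil => intro _ h; exact absurd rfl h
  | cons p ps ih =>
    intro h _
    cases ps with
    | nil =>
      obtain ⟨hpne, hpc⟩ := h p (by simp)
      cases hp : p.reverse with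
      | nil => exact absurd (by simpa using hp) hpne
      | cons c t =>
        have : c ∈ p := by
          have : c ∈ p.reverse := by simp [hp]
          simpa using this
        exact ⟨c, t, by simp [List.intercalate, hp], hpc c this⟩
    | cons q qs =>
      obtain ⟨c, t, hct, hc⟩ := ih (fun r hr => h r (by simp [hr])) (by simp)
      exact ⟨c, t ++ ([' '] ++ p.reverse), by rw [pv_join_two]; simp [hct], hc⟩

theorem pv_strip_join (ps : List (List Char))
    (h : ∀ p ∈ ps, p ≠ [] ∧ ∀ c ∈ p, PySem.Chars.isspace c = false) :
    PySem.Chars.strip (List.intercalate [' '] ps) = List.intercalate [' '] ps := by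
  cases hps : ps with
  | nil => simp [List.intercalate, PySem.Chars.strip, PySem.Chars.lstrip, PySem.Chars.rstrip]
  | cons p ps' =>
    subst hps
    obtain ⟨c, t, hct, hc⟩ := pv_head_join (p :: ps') h (by simp)
    obtain ⟨c', t', hct', hc'⟩ := pv_last_join (p :: ps') h (by simp)
    rw [PySem.Chars.strip, PySem.Chars.lstrip, hct]
    rw [List.dropWhile_cons_of_neg (by simp [hc]), ← hct]
    rw [PySem.Chars.rstrip, hct']
    rw [List.dropWhile_cons_of_neg (by simp [hc']), ← hct']
    simp

-- normalize_text's output is an intercalation of nonempty all-alphanumeric pieces by single spaces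
theorem pv_norm (v : String) :
    ∃ ps : List (List Char), (normalize_text v).toList = List.intercalate [' '] ps ∧
      ∀ p ∈ ps, p ≠ [] ∧ ∀ c ∈ p, PySem.Chars.isalnum c = true ∧ PySem.Chars.isspace c = false := by
  refine ⟨PySem.Chars.split₀ ((PySem.Str.lower v).toList.foldl
      (fun acc c => acc ++ [if PySem.Chars.isalnum c || PySem.Chars.isspace c then c else ' ']) []), ?_, ?_⟩
  · show (PySem.Str.join " " (PySem.Str.split₀ (String.ofList _))).toList = _
    rw [PySem.Str.toList_join, PySem.Str.split₀_map_toList]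
    simp [PySem.Chars.join, String.toList_ofList]
  · set cleaned := (PySem.Str.lower v).toList.foldl
      (fun acc c => acc ++ [if PySem.Chars.isalnum c || PySem.Chars.isspace c then c else ' ']) [] with hclean
    have hmem : ∀ c ∈ cleaned, PySem.Chars.isspace c = true ∨ PySem.Chars.isalnum c = true := by
      rw [hclean, PySem.List.foldl_append_singleton_eq_map]
      intro c hc
      simp only [List.nil_append, List.mem_map] at hc
      obtain ⟨x, _, hx⟩ := hc
      by_cases hxc : (PySem.Chars.isalnum x || PySem.Chars.isspace x) = true
      · rw [if_pos hxc] at hx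
        subst hx
        rcases Bool.or_eq_true_iff.mp hxc with h | h
        · exact Or.inr h
        · exact Or.inl h
      · rw [if_neg hxc] at hx
        subst hx
        exact Or.inl (by decide)
    exact pv_split0_go_pieces (fun c => PySem.Chars.isalnum c = true) cleaned [] []
      hmem (by simp) (by simp)

theorem pv_norm_strip (v : String) :
    PySem.Chars.strip (normalize_text v).toList = (normalize_text v).toList := by
  obtain ⟨ps, heq, hps⟩ := pv_norm v
  rw [heq]
  exact pv_strip_join ps (fun p hp => ⟨(hps p hp).1, fun c hc => ((hps p hp).2 c hc).2⟩)

theorem pv_norm_no_punct (v : String) :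
    ∀ c ∈ (normalize_text v).toList, ("(),/".toList).contains c = false := by
  obtain ⟨ps, heq, hps⟩ := pv_norm v
  intro c hc
  rw [heq] at hc
  have := pv_mem_join (fun c => PySem.Chars.isalnum c = true) ps
      (fun p hp x hx => ((hps p hp).2 x hx).1) c hc
  rcases this with h | h
  · cases hcon : ("(),/".toList).contains c with
    | false => rfl
    | true =>
      have hl : "(),/".toList = ['(', ')', ',', '/'] := by decide
      have hcmem : c = '(' ∨ c = ')' ∨ c = ',' ∨ c = '/' := by
        have : c ∈ "(),/".toList := by simpa using hcon
        rw [hl] at this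
        simpa using this
      rcases hcmem with h' | h' | h' | h' <;> (subst h'; exact absurd h (by decide))
  · subst h; rfl

-- a single-character separator that never occurs splits into the whole string
theorem pv_splitOn_go_single (a : Char) :
    ∀ (l : List Char) (fuel : Nat) (cur acc : _), l.length ≤ fuel → (∀ c ∈ l, c ≠ a) →
      PySem.Chars.splitOn.go [a] fuel l cur acc = ((cur.reverse ++ l) :: acc).reverse := by
  intro l
  induction l with
  | nil =>
    intro fuel cur acc _ _
    cases fuel <;> simp [PySem.Chars.splitOn.go]
  | cons c rest ih =>
    intro fuel cur acc hlen hmem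
    cases fuel with
    | zero => simp at hlen
    | succ fuel =>
      have hc : c ≠ a := hmem c (by simp)
      have hpre : List.isPrefixOf [a] (c :: rest) = false := by
        simp [List.isPrefixOf]
        intro h; exact (hc h.symm).elim
      rw [PySem.Chars.splitOn.go]
      simp only [hpre, Bool.false_eq_true, if_false]
      rw [ih fuel (c :: cur) acc (by simpa using Nat.lt_succ_iff.mp (Nat.lt_of_lt_of_le (by simp) hlen)) (fun x hx => hmem x (by simp [hx]))]
      simp

theorem pv_splitOn_single (a : Char) (l : List Char) (h : ∀ c ∈ l, c ≠ a) :
    PySem.Chars.splitOn l [a] = [l] := by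
  rw [PySem.Chars.splitOn, pv_splitOn_go_single a l (l.length + 1) [] [] (by omega) h]
  simp

-- splitOn.go's accumulator is a prefix of the result
theorem pv_splitOn_go_acc (sep : List Char) :
    ∀ (fuel : Nat) (l cur acc : _),
      PySem.Chars.splitOn.go sep fuel l cur acc = acc.reverse ++ PySem.Chars.splitOn.go sep fuel l cur [] := by
  intro fuel
  induction fuel with
  | zero => intro l cur acc; cases l <;> simp [PySem.Chars.splitOn.go]
  | succ fuel ih =>
    intro l cur acc
    cases l with
    | nil => simp [PySem.Chars.splitOn.go]
    | cons c rest =>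
      rw [PySem.Chars.splitOn.go, PySem.Chars.splitOn.go]
      by_cases hp : List.isPrefixOf sep (c :: rest) = true
      · simp only [hp, if_pos]
        rw [ih _ [] (cur.reverse :: acc), ih _ [] ([cur.reverse])]
        simp
      · simp only [hp, Bool.false_eq_true, if_false]
        exact ih rest (c :: cur) acc

-- on strings without "(),/" characters B's scanner is exactly splitOn " et "
theorem pv_scan_eq_go :
    ∀ (fuel : Nat) (l buf parts : _), l.length ≤ fuel →
      (∀ c ∈ l, ("(),/".toList).contains c = false) →
      pvScanGo l buf parts = parts ++ PySem.Chars.splitOn.go (" et ".toList) fuel l buf.reverse [] := by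
  intro fuel
  induction fuel with
  | zero =>
    intro l buf parts hlen _
    have : l = [] := List.length_eq_zero_iff.mp (Nat.le_zero.mp hlen)
    subst this
    simp [pvScanGo, PySem.Chars.splitOn.go]
  | succ fuel ih =>
    intro l buf parts hlen hmem
    cases l with
    | nil => simp [pvScanGo, PySem.Chars.splitOn.go]
    | cons c rest =>
      rw [pvScanGo, PySem.Chars.splitOn.go]
      have hc : ("(),/".toList).contains c = false := hmem c (by simp)
      simp only [hc, Bool.false_eq_true, if_false]
      cases hp : List.isPrefixOf (" et ".toList) (c :: rest) with
      | true =>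
        have hsw : PySem.Chars.startswith (c :: rest) (" et ".toList) = true := by
          unfold PySem.Chars.startswith; exact hp
        simp only [hsw, if_pos]
        rw [pv_splitOn_go_acc, ih ((c :: rest).drop 4) [] (parts ++ [buf])
              (by simp at hlen ⊢; omega)
              (fun x hx => hmem x (List.mem_of_mem_drop hx))]
        simp
      | false =>
        have hsw : PySem.Chars.startswith (c :: rest) (" et ".toList) = false := by
          unfold PySem.Chars.startswith; exact hp
        simp only [hsw, Bool.false_eq_true, if_false]
        rw [ih rest (buf ++ [c]) parts (by simp at hlen ⊢; omega)
              (fun x hx => hmem x (by simp [hx]))]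
        simp

theorem pv_scan_eq_splitOn (l : List Char) (h : ∀ c ∈ l, ("(),/".toList).contains c = false) :
    pvScanGo l [] [] = PySem.Chars.splitOn l (" et ".toList) := by
  rw [PySem.Chars.splitOn, pv_scan_eq_go (l.length + 1) l [] [] (by omega) h]
  simp

-- ===== VERDICT (by name: the statement is the Claim_ definition above) =====
theorem split_requirement_terms_spec : Claim_equal_split_requirement_terms := by
  intro r _
  unfold Spec_split_requirement_terms split_requirement_terms split_requirement_terms_alt
  simp only [List.foldl_cons, List.foldl_nil, List.nil_append]
  set n := normalize_text r with hn
  have hnp : ∀ c ∈ n.toList, ("(),/".toList).contains c = false := by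
    rw [hn]; exact pv_norm_no_punct r
  by_cases h0 : n = ""
  · rw [h0]
    rw [show pvScanGo "".toList [] [] = [[]] from by rw [show "".toList = [] from rfl, pvScanGo]; rfl]
    decide
  · have hstrip : PySem.Str.strip n = n := by
      rw [PySem.Str.strip]
      rw [show PySem.Chars.strip n.toList = n.toList from by rw [hn]; exact pv_norm_strip r]
      exact String.ofList_toList
    have hbne : (n != "") = true := bne_iff_ne.mpr h0
    have hnot : ∀ (a : Char), ("(),/".toList).contains a = true → ∀ c ∈ n.toList, c ≠ a := by
      intro a haa c hc heq
      subst heq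
      rw [hnp c hc] at haa
      exact Bool.false_ne_true haa
    have pass : ∀ (sep : String) (a : Char), sep.toList = [a] → (∀ c ∈ n.toList, c ≠ a) →
        List.map PySem.Str.strip
          (List.filter (fun part => PySem.Str.strip part != "") ((PySem.Str.split? n sep).getD [])) = [n] := by
      intro sep a hsep ha
      have h1 : PySem.Str.split? n sep = some [n] := by
        rw [PySem.Str.split?, hsep, PySem.Chars.split?]
        rw [if_neg (by simp)]
        rw [pv_splitOn_single a n.toList ha]
        simp [String.ofList_toList]
      rw [h1]
      simp only [Option.getD_some, List.filter_cons, List.filter_nil, hstrip, hbne, if_pos,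
        List.map_cons, List.map_nil]
    rw [pass "(" '(' (by decide) (hnot '(' (by decide))]
    simp only [List.foldl_cons, List.foldl_nil, List.nil_append]
    rw [pass ")" ')' (by decide) (hnot ')' (by decide))]
    simp only [List.foldl_cons, List.foldl_nil, List.nil_append]
    rw [pass "," ',' (by decide) (hnot ',' (by decide))]
    simp only [List.foldl_cons, List.foldl_nil, List.nil_append]
    rw [pass "/" '/' (by decide) (hnot '/' (by decide))]
    simp only [List.foldl_cons, List.foldl_nil, List.nil_append]
    have hsplit5 : (PySem.Str.split? n " et ").getD []
        = (PySem.Chars.splitOn n.toList (" et ".toList)).map String.ofList := by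
      rw [PySem.Str.split?, PySem.Chars.split?, if_neg (by simp)]
      simp
    rw [hsplit5, pv_scan_eq_splitOn n.toList hnp]
    rw [List.filter_map, List.filter_filter, List.filter_map, List.map_map]
    have hso : PySem.Str.strip ∘ String.ofList = fun l => String.ofList (PySem.Chars.strip l) := by
      funext l
      show PySem.Str.strip (String.ofList l) = _
      rw [PySem.Str.strip, String.toList_ofList]
    rw [hso]
    apply congrArg
    apply List.filter_congr
    intro x _
    simp only [Function.comp_apply]
    have hS : PySem.Str.strip (String.ofList x) = String.ofList (PySem.Chars.strip x) := by
      rw [PySem.Str.strip, String.toList_ofList]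
    have hlen : PySem.Str.len (String.ofList (PySem.Chars.strip x)) = ((PySem.Chars.strip x).length : Int) := by
      rw [PySem.Str.len, String.toList_ofList]
    rw [hS, hlen]
    have hcast : ((3 : Int) ≤ ((PySem.Chars.strip x).length : Int)) ↔ 3 ≤ (PySem.Chars.strip x).length := by
      exact_mod_cast Iff.rfl
    by_cases h3 : 3 ≤ (PySem.Chars.strip x).length
    · have hne' : String.ofList (PySem.Chars.strip x) ≠ "" := by
        intro he
        have h' := congrArg String.toList he
        rw [String.toList_ofList] at h'
        rw [h'] at h3
        simp at h3
      simp [hcast, h3, bne_iff_ne.mpr hne']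
    · simp [hcast, h3]
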